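-- pv_equiv track=rewrite | github.com/ckoons/BubbleSpacetimeTheory | play/toy_280_weak_homological_force.py | compute_beta1
-- ===== SOURCE A (Python) =====
-- def compute_beta1(n, edges, triangles):
--     """Compute β₁ = dim(H₁(K; F₂)) = dim(ker ∂₁) - dim(im ∂₂).
--
--     Uses rank computation over F₂. No generators needed — just the number.
--     This is much faster than full generator extraction.
--
--     β₁ = |E| - rank(∂₁) - rank(∂₂)
--         = |E| - (|V| - #components) - rank(∂₂)
--
--     where rank(∂₁) = |V| - #connected_components (by F₂ Euler).
--     """
--     E = len(edges)
--     if E == 0: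
--         return 0
--
--     # Connected components via union-find
--     parent = list(range(n))
--     def find(x):
--         while parent[x] != x:
--             parent[x] = parent[parent[x]]
--             x = parent[x]
--         return x
--     def union(a, b):
--         a, b = find(a), find(b)
--         if a != b:
--             parent[a] = b
--             return True
--         return False
--
--     for i, j in edges:
--         union(i, j)
--
--     # Only count components of vertices that appear in edges
--     verts_in_graph = set()
--     for i, j in edges:
--         verts_in_graph.add(i)
--         verts_in_graph.add(j)
--     n_components = len(set(find(v) for v in verts_in_graph))
--
--     rank_d1 = len(verts_in_graph) - n_components
--
--     # rank(∂₂) via RREF of the E×F boundary matrix over F₂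
--     F = len(triangles)
--     if F == 0:
--         return E - rank_d1
--
--     edge_idx = {e: i for i, e in enumerate(edges)}
--     # Build ∂₂ as sparse columns, then do F₂ column reduction
--     # Each triangle boundary is the XOR of its 3 edge indicators
--     cols = []
--     for v0, v1, v2 in triangles:
--         col = set()
--         for e in [(v0, v1), (v0, v2), (v1, v2)]:
--             if e in edge_idx:
--                 col.add(edge_idx[e])
--         cols.append(col)
--
--     # Column reduction over F₂ (pivot per row)
--     pivot_row = {}  # row -> column index that pivots there
--     rank_d2 = 0
--     for ci in range(F):
--         col = cols[ci].copy()
--         while col: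
--             top = min(col)
--             if top in pivot_row:
--                 # XOR with the pivoting column
--                 col ^= cols[pivot_row[top]]
--             else:
--                 pivot_row[top] = ci
--                 cols[ci] = col
--                 rank_d2 += 1
--                 break
--
--     return E - rank_d1 - rank_d2
-- ===== SOURCE B (Python) =====
-- def compute_beta1(n, edges, triangles):
--     """beta_1 = |E| - rank(d1) - rank(d2) over F2.
--
--     Connected components by recolouring: label[v] is the component colour of
--     vertex v; each edge merges its endpoints' colours by repainting the
--     smaller colour class (classes tracked in a colour -> members dict).
--     rank(d2) by F2 column reduction that keeps each pivot row's fully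
--     reduced column in a dict."""
--     E = len(edges)
--     if E == 0:
--         return 0
--
--     label = list(range(n))
--     members = {}  # colour -> its vertices (no entry: just {colour}; repainted colours go stale, never looked up again)
--     for i, j in edges:
--         li, lj = label[i], label[j]
--         if li == lj:
--             continue
--         if len(members.get(li, [li])) > len(members.get(lj, [lj])):
--             li, lj = lj, li
--         small = members.get(li, [li])
--         for v in small:
--             label[v] = lj
--         big = members.get(lj)
--         if big is None:
--             big = [lj]
--             members[lj] = big
--         big.extend(small)
--
--     verts = {v for e in edges for v in e}
--     n_components = len({label[v] for v in verts})
--     rank_d1 = len(verts) - n_components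
--
--     F = len(triangles)
--     if F == 0:
--         return E - rank_d1
--
--     edge_idx = {e: i for i, e in enumerate(edges)}
--     pivots = {}  # row -> fully reduced column (a set of edge indices)
--     rank_d2 = 0
--     for v0, v1, v2 in triangles:
--         col = set()
--         for e in [(v0, v1), (v0, v2), (v1, v2)]:
--             if e in edge_idx:
--                 col.add(edge_idx[e])
--         while col:
--             top = min(col)
--             if top in pivots:
--                 col ^= pivots[top]
--             else:
--                 pivots[top] = col
--                 rank_d2 += 1
--                 break
--
--     return E - rank_d1 - rank_d2
-- ===== Notes on version B (the rewrite author's own statement) =====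
-- stated objective: alternative
-- what changed: Connected components are computed by recolouring a colour array (label[v] = component colour; each edge merges its endpoints' colours by repainting the smaller colour class, tracked in a colour->members dict, and components are counted as distinct colours of the endpoint vertices) instead of a path-compressing union-find with a final find-per-vertex pass, and the F2 column reduction stores each pivot's fully reduced column directly in a row->column dict instead of indexing back into a mutable column list via a row->column-index map; …
import Mathlib
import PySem

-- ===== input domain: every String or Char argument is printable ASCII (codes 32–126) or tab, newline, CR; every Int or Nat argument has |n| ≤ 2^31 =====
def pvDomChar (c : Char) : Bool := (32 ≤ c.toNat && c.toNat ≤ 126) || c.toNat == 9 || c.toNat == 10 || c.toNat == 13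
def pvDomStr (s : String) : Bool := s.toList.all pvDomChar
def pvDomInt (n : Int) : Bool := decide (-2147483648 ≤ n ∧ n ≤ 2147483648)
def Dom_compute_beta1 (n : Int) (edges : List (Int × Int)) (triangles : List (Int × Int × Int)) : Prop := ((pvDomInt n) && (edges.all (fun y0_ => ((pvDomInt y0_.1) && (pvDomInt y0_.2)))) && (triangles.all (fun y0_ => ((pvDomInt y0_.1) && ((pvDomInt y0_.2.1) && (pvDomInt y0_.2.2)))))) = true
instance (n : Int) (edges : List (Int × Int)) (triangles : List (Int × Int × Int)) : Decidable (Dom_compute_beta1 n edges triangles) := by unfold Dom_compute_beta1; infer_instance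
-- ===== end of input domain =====

-- B finds connected components by label propagation over a vertex->label dict instead of
-- union-find with path compression, and keeps each F2 pivot's reduced column directly in a
-- row->column dict instead of a row->column-index map into a mutable column list (alternative,
-- same outputs on vertex ids 0..n-1; A's in-place mutation is local, no observable side effects).

-- ===== PORT A =====

-- list write with Python index semantics on -len ≤ i < len (negative indices wrap)
def pvSet {α : Type} (l : List α) (x : Int) (v : α) : List α :=
  if 0 ≤ x ∧ x.toNat < l.length then l.set x.toNat v
  else if x < 0 ∧ 0 ≤ x + l.length then l.set (x + l.length).toNat v
  else l

-- parent[x]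
def pvG (p : List Int) (x : Int) : Int := PySem.List.pyGetD p x 0

-- while parent[x] != x: parent[x] = parent[parent[x]]; x = parent[x]   (fuel makes the loop
-- structural; fuel = len+1 always suffices on Pre_ inputs, where the parent array is a forest)
def pvFind (fuel : Nat) (p : List Int) (x : Int) : List Int × Int :=
  match fuel with
  | 0 => (p, x)
  | f + 1 =>
    if pvG p x ≠ x then
      let gp := pvG p (pvG p x)
      pvFind f (pvSet p x gp) gp
    else (p, x)

def pvUnion (p : List Int) (a b : Int) : List Int :=
  let fa := pvFind (p.length + 1) p a
  let fb := pvFind (fa.1.length + 1) fa.1 b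
  if fa.2 ≠ fb.2 then pvSet fb.1 fa.2 fb.2 else fb.1

-- edge_idx = {e: i for i, e in enumerate(edges)}  (identical line in A and B)
def pvEdgeIdx (edges : List (Int × Int)) : PySem.Dict (Int × Int) Int :=
  (PySem.List.enumerate edges 0).foldl (fun d q => d.insert q.2 q.1) PySem.Dict.empty

-- the column of one triangle (identical loop in A and B)
def pvBcol (edge_idx : PySem.Dict (Int × Int) Int) (t : Int × Int × Int) : PySem.Set Int :=
  [(t.1, t.2.1), (t.1, t.2.2), (t.2.1, t.2.2)].foldl
    (fun c e => if edge_idx.contains e then PySem.Set.add c (edge_idx.getD e 0) else c)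
    PySem.Set.empty

-- while col: top=min(col); if top in pivot_row: col ^= cols[pivot_row[top]] else: register
def pvRedA (fuel : Nat) (cols : List (PySem.Set Int)) (pr : PySem.Dict Int Int) (rank : Int)
    (ci : Int) (col : PySem.Set Int) : List (PySem.Set Int) × PySem.Dict Int Int × Int :=
  match fuel with
  | 0 => (cols, pr, rank)
  | f + 1 =>
    if col = [] then (cols, pr, rank)
    else
      match PySem.List.min? col (fun x => x) with
      | none => (cols, pr, rank)
      | some top =>
        match pr.get? top with
        | some pj => pvRedA f cols pr rank ci (PySem.Set.symmDiff col (PySem.List.pyGetD cols pj []))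
        | none => (pvSet cols ci col, pr.insert top ci, rank + 1)

def compute_beta1 (n : Int) (edges : List (Int × Int)) (triangles : List (Int × Int × Int)) : Int :=
  let E := edges.length
  if E = 0 then 0
  else
    let parent0 : List Int := (List.range n.toNat).map (fun k => Int.ofNat k)
    let parent := edges.foldl (fun p e => pvUnion p e.1 e.2) parent0
    let verts : PySem.Set Int :=
      edges.foldl (fun s e => PySem.Set.add (PySem.Set.add s e.1) e.2) PySem.Set.empty
    let st := verts.foldl (fun (st : List Int × PySem.Set Int) v =>
        let fr := pvFind (st.1.length + 1) st.1 v
        (fr.1, PySem.Set.add st.2 fr.2)) (parent, PySem.Set.empty)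
    let n_components : Int := st.2.length
    let rank_d1 : Int := (verts.length : Int) - n_components
    let F := triangles.length
    if F = 0 then (E : Int) - rank_d1
    else
      let edge_idx := pvEdgeIdx edges
      let cols0 := triangles.map (pvBcol edge_idx)
      let fin := (PySem.List.pyRange 0 (F : Int) 1).foldl
        (fun (st : List (PySem.Set Int) × PySem.Dict Int Int × Int) ci =>
          pvRedA (E + 1) st.1 st.2.1 st.2.2 ci (PySem.List.pyGetD st.1 ci []))
        (cols0, PySem.Dict.empty, 0)
      (E : Int) - rank_d1 - fin.2.2

-- ===== PORT B =====

-- li, lj = label[i], label[j]; repaint colour li's class to lj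
-- ('for v in small: label[v] = lj' plus the members-dict bookkeeping)
def pvPaint (lab : List Int) (mem : PySem.Dict Int (List Int)) (li lj : Int) :
    List Int × PySem.Dict Int (List Int) :=
  ((mem.getD li [li]).foldl (fun l v => pvSet l v lj) lab,
   mem.insert lj (mem.getD lj [lj] ++ mem.getD li [li]))

-- one edge: if the colours differ, repaint the smaller colour class
def pvRecolor (st : List Int × PySem.Dict Int (List Int)) (e : Int × Int) :
    List Int × PySem.Dict Int (List Int) :=
  if pvG st.1 e.1 = pvG st.1 e.2 then st
  else if (st.2.getD (pvG st.1 e.1) [pvG st.1 e.1]).length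
        > (st.2.getD (pvG st.1 e.2) [pvG st.1 e.2]).length
  then pvPaint st.1 st.2 (pvG st.1 e.2) (pvG st.1 e.1)
  else pvPaint st.1 st.2 (pvG st.1 e.1) (pvG st.1 e.2)

-- while col: top=min(col); if top in pivots: col ^= pivots[top] else: pivots[top]=col; rank+=1
def pvRedB (fuel : Nat) (pivots : PySem.Dict Int (PySem.Set Int)) (rank : Int)
    (col : PySem.Set Int) : PySem.Dict Int (PySem.Set Int) × Int :=
  match fuel with
  | 0 => (pivots, rank)
  | f + 1 =>
    if col = [] then (pivots, rank)
    else
      match PySem.List.min? col (fun x => x) with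
      | none => (pivots, rank)
      | some top =>
        match pivots.get? top with
        | some pc => pvRedB f pivots rank (PySem.Set.symmDiff col pc)
        | none => (pivots.insert top col, rank + 1)

def compute_beta1_alt (n : Int) (edges : List (Int × Int)) (triangles : List (Int × Int × Int)) : Int :=
  let E := edges.length
  if E = 0 then 0
  else
    let label0 : List Int := (List.range n.toNat).map (fun k => Int.ofNat k)
    let st := edges.foldl pvRecolor (label0, PySem.Dict.empty)
    let verts : PySem.Set Int :=
      edges.foldl (fun s e => PySem.Set.add (PySem.Set.add s e.1) e.2) PySem.Set.empty
    let n_components : Int :=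
      (verts.foldl (fun s v => PySem.Set.add s (pvG st.1 v)) PySem.Set.empty).length
    let rank_d1 : Int := (verts.length : Int) - n_components
    let F := triangles.length
    if F = 0 then (E : Int) - rank_d1
    else
      let edge_idx := pvEdgeIdx edges
      let fin := triangles.foldl
        (fun (st : PySem.Dict Int (PySem.Set Int) × Int) t =>
          pvRedB (E + 1) st.1 st.2 (pvBcol edge_idx t))
        (PySem.Dict.empty, 0)
      (E : Int) - rank_d1 - fin.2

-- ===== PRECONDITION & SPEC =====

-- Pre_ admits exactly the edge endpoints Python's list indexing accepts, -n ≤ v < n;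
-- outside it A raises IndexError.
def Pre_compute_beta1 (n : Int) (edges : List (Int × Int)) (triangles : List (Int × Int × Int)) : Prop :=
  ∀ e ∈ edges, -n ≤ e.1 ∧ e.1 < n ∧ -n ≤ e.2 ∧ e.2 < n

instance (n : Int) (edges : List (Int × Int)) (triangles : List (Int × Int × Int)) :
    Decidable (Pre_compute_beta1 n edges triangles) := by unfold Pre_compute_beta1; infer_instance

def pvWitness_compute_beta1 : Int × (List (Int × Int)) × (List (Int × Int × Int)) :=
  (3, [(0, 1), (0, 2), (1, 2)], [(0, 1, 2)])

def Spec_compute_beta1 (n : Int) (edges : List (Int × Int)) (triangles : List (Int × Int × Int)) (out : Int) : Prop := out = compute_beta1_alt n edges triangles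
instance (n : Int) (edges : List (Int × Int)) (triangles : List (Int × Int × Int)) (out : Int) : Decidable (Spec_compute_beta1 n edges triangles out) := by unfold Spec_compute_beta1; infer_instance

-- ===== CLAIM (what is proved, stated in full; the proofs are below) =====
def Claim_equal_compute_beta1 : Prop := ∀ (n : Int) (edges : List (Int × Int)) (triangles : List (Int × Int × Int)), Dom_compute_beta1 n edges triangles → Pre_compute_beta1 n edges triangles → Spec_compute_beta1 n edges triangles (compute_beta1 n edges triangles)

-- ===== LEMMAS AND PROOFS =====

-- ---- generic forest machinery for the union-find side ----

def pvIter (p : List Int) : Nat → Int → Int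
  | 0, x => x
  | d + 1, x => pvIter p d (pvG p x)

def pvInR (p : List Int) (x : Int) : Prop := 0 ≤ x ∧ x < (p.length : Int)

def pvWF (p : List Int) : Prop :=
  (∀ x, pvInR p x → pvInR p (pvG p x)) ∧
  (∀ x, pvInR p x → ∃ d, pvG p (pvIter p d x) = pvIter p d x)

def pvRoot (p : List Int) (x : Int) : Int := pvIter p p.length x

def pvDist (p : List Int) (x : Int) : Nat :=
  (List.range (p.length + 1)).findIdx (fun d => decide (pvG p (pvIter p d x) = pvIter p d x))

theorem pvG_eq (p : List Int) (x : Int) (h0 : 0 ≤ x) (h1 : x < (p.length : Int)) :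
    pvG p x = p[x.toNat]'(by omega) := by
  exact PySem.List.pyGetD_eq_getElem p 0 h0 h1

theorem pvSet_length {α : Type} (l : List α) (x : Int) (v : α) :
    (pvSet l x v).length = l.length := by
  unfold pvSet; split
  · simp
  · split <;> simp

theorem pvG_pvSet_self (l : List Int) (x v : Int) (h0 : 0 ≤ x) (h1 : x < (l.length : Int)) :
    pvG (pvSet l x v) x = v := by
  have hx : x.toNat < l.length := by omega
  unfold pvSet
  rw [if_pos ⟨h0, hx⟩]
  rw [pvG_eq _ _ h0 (by simp; omega)]
  simp

theorem pvG_pvSet_ne (l : List Int) (x v z : Int) (h0 : 0 ≤ z) (hx0 : 0 ≤ x) (hne : z ≠ x) :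
    pvG (pvSet l x v) z = pvG l z := by
  unfold pvSet
  split
  · next h =>
    by_cases hz : z < (l.length : Int)
    · rw [pvG_eq _ _ h0 (by simpa using hz), pvG_eq _ _ h0 hz]
      rw [List.getElem_set_ne (by omega)]
    · unfold pvG PySem.List.pyGetD
      have : PySem.List.pyGet? (l.set x.toNat v) z = none := by
        rw [PySem.List.pyGet?_eq_none_iff]
        unfold PySem.Raise.InRange
        simp only [List.length_set]
        omega
      have h2 : PySem.List.pyGet? l z = none := by
        rw [PySem.List.pyGet?_eq_none_iff]
        unfold PySem.Raise.InRange
        omega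
      rw [this, h2]
  · rw [if_neg (show ¬ (x < 0 ∧ 0 ≤ x + (l.length : Int)) from by omega)]

theorem pvIter_succ' (p : List Int) (d : Nat) (x : Int) :
    pvIter p (d + 1) x = pvG p (pvIter p d x) := by
  induction d generalizing x with
  | zero => rfl
  | succ d ih =>
    show pvIter p (d + 1) (pvG p x) = pvG p (pvIter p (d + 1) x)
    rw [ih]
    rfl

theorem pvIter_add (p : List Int) (a b : Nat) (x : Int) :
    pvIter p (a + b) x = pvIter p b (pvIter p a x) := by
  induction b with
  | zero => rfl
  | succ b ih =>
    have : a + (b + 1) = (a + b) + 1 := by omega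
    rw [this, pvIter_succ', pvIter_succ', ih]

theorem pvFix_stable (p : List Int) (d : Nat) (x : Int)
    (hf : pvG p (pvIter p d x) = pvIter p d x) :
    ∀ e, d ≤ e → pvIter p e x = pvIter p d x := by
  intro e he
  obtain ⟨k, rfl⟩ : ∃ k, e = d + k := ⟨e - d, by omega⟩
  induction k with
  | zero => rfl
  | succ k ih =>
    have h1 : d + (k + 1) = (d + k) + 1 := by omega
    rw [h1, pvIter_succ', ih (by omega), hf]

theorem pvInR_iter (p : List Int) (hwf : pvWF p) (x : Int) (hx : pvInR p x) (d : Nat) :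
    pvInR p (pvIter p d x) := by
  induction d generalizing x with
  | zero => exact hx
  | succ d ih => exact ih _ (hwf.1 x hx)

theorem pvRoot_fix (p : List Int) (hwf : pvWF p) (x : Int) (hx : pvInR p x) :
    pvG p (pvRoot p x) = pvRoot p x := by
  obtain ⟨d, hd⟩ := hwf.2 x hx
  -- find a fixed point within p.length steps
  have key : ∃ a, a ≤ p.length ∧ pvG p (pvIter p a x) = pvIter p a x := by
    by_cases hdl : d ≤ p.length
    · exact ⟨d, hdl, hd⟩
    · -- pigeonhole among iterates 0..len
      have hlen : 0 < p.length := by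
        rcases hx with ⟨hx0, hx1⟩; omega
      have hmap : Set.MapsTo (fun d0 => (pvIter p d0 x).toNat)
          ↑(Finset.range (p.length + 1)) ↑(Finset.range p.length) := by
        intro d0 _
        have := pvInR_iter p hwf x hx d0
        simp only [Finset.coe_range, Set.mem_Iio]
        rcases this with ⟨h1, h2⟩
        omega
      obtain ⟨a, ha, b, hb, hab, hfab⟩ :=
        Finset.exists_ne_map_eq_of_card_lt_of_maps_to
          (by simp) hmap
      -- wlog a < b
      have main : ∀ a b : Nat, a < b → b ≤ p.length →
          pvIter p a x = pvIter p b x →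
          ∃ a', a' ≤ p.length ∧ pvG p (pvIter p a' x) = pvIter p a' x := by
        intro a b hlt hble heq
        set y := pvIter p a x with hy
        have hm : pvIter p (b - a) y = y := by
          rw [hy, ← pvIter_add]
          have : a + (b - a) = b := by omega
          rw [this, ← heq]
        -- periodicity
        have hper : ∀ k, pvIter p (k * (b - a)) y = y := by
          intro k
          induction k with
          | zero => simp [pvIter]
          | succ k ih =>
            have h1 : (k + 1) * (b - a) = k * (b - a) + (b - a) := by ring
            rw [h1, pvIter_add, ih, hm]
        -- y reaches the fixed point at step d - a
        have hda : a ≤ d := by omega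
        have hfy : pvG p (pvIter p (d - a) y) = pvIter p (d - a) y := by
          rw [hy, ← pvIter_add]
          have : a + (d - a) = d := by omega
          rw [this]; exact hd
        have hbig : d - a ≤ d * (b - a) := by
          have h1 : 1 ≤ b - a := by omega
          calc d - a ≤ d := by omega
            _ = d * 1 := by ring
            _ ≤ d * (b - a) := by exact Nat.mul_le_mul_left d h1
        have : pvIter p (d * (b - a)) y = pvIter p (d - a) y :=
          pvFix_stable p (d - a) y hfy _ hbig
        rw [hper d] at this
        -- so y itself is fixed
        have hyfix : pvG p y = y := by
          conv_lhs => rw [this]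
          conv_rhs => rw [this]
          exact hfy
        rw [hy] at hyfix
        exact ⟨a, by omega, hyfix⟩
      have hiter_eq : pvIter p a x = pvIter p b x := by
        have h1 := pvInR_iter p hwf x hx a
        have h2 := pvInR_iter p hwf x hx b
        rcases h1 with ⟨h1a, _⟩; rcases h2 with ⟨h2a, _⟩
        omega
      rcases Nat.lt_or_ge a b with h | h
      · exact main a b h (by simpa using hb) hiter_eq
      · have : b < a := by omega
        exact main b a this (by simpa using ha) hiter_eq.symm
  obtain ⟨a, hale, hafix⟩ := key
  unfold pvRoot
  rw [pvFix_stable p a x hafix p.length hale]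
  exact hafix

theorem pvRoot_inR (p : List Int) (hwf : pvWF p) (x : Int) (hx : pvInR p x) :
    pvInR p (pvRoot p x) := pvInR_iter p hwf x hx p.length

theorem pvRoot_eq_of_fix (p : List Int) (hwf : pvWF p) (x : Int) (hx : pvInR p x) (d : Nat)
    (h : pvG p (pvIter p d x) = pvIter p d x) : pvIter p d x = pvRoot p x := by
  rcases Nat.le_total d p.length with hle | hle2
  · unfold pvRoot
    rw [pvFix_stable p d x h p.length hle]
  · have hroot := pvRoot_fix p hwf x hx
    unfold pvRoot at hroot ⊢
    rw [pvFix_stable p p.length x hroot d hle2]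

theorem pvRoot_pg (p : List Int) (hwf : pvWF p) (x : Int) (hx : pvInR p x) :
    pvRoot p (pvG p x) = pvRoot p x := by
  have h1 : pvRoot p (pvG p x) = pvIter p (p.length + 1) x := by
    unfold pvRoot
    rfl
  rw [h1]
  have hroot := pvRoot_fix p hwf x hx
  unfold pvRoot at hroot ⊢
  rw [pvFix_stable p p.length x hroot (p.length + 1) (by omega)]

theorem pvDist_le_of_fix (p : List Int) (x : Int) (d : Nat) (hd : d ≤ p.length)
    (h : pvG p (pvIter p d x) = pvIter p d x) : pvDist p x ≤ d := by
  by_contra hc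
  push_neg at hc
  have hlen : d < (List.range (p.length + 1)).length := by simp; omega
  have := List.not_of_lt_findIdx (xs := List.range (p.length + 1))
    (p := fun d0 => decide (pvG p (pvIter p d0 x) = pvIter p d0 x)) (i := d) hc
  rw [List.getElem_range] at this
  simp only [decide_eq_false_iff_not] at this
  exact this h

theorem pvDist_le_len (p : List Int) (hwf : pvWF p) (x : Int) (hx : pvInR p x) :
    pvDist p x ≤ p.length :=
  pvDist_le_of_fix p x p.length le_rfl (pvRoot_fix p hwf x hx)

theorem pvDist_fix (p : List Int) (hwf : pvWF p) (x : Int) (hx : pvInR p x) :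
    pvG p (pvIter p (pvDist p x) x) = pvIter p (pvDist p x) x := by
  have hlt : (List.range (p.length + 1)).findIdx
      (fun d0 => decide (pvG p (pvIter p d0 x) = pvIter p d0 x)) < (List.range (p.length + 1)).length := by
    rw [List.findIdx_lt_length]
    refine ⟨p.length, by simp, ?_⟩
    simp only [decide_eq_true_eq]
    exact pvRoot_fix p hwf x hx
  have := List.findIdx_getElem (w := hlt)
  rw [List.getElem_range] at this
  simp only [decide_eq_true_eq] at this
  exact this

theorem pvDist_min (p : List Int) (x : Int) (e : Nat) (h : e < pvDist p x)
    (hlen : e < p.length + 1) :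
    pvG p (pvIter p e x) ≠ pvIter p e x := by
  have := List.not_of_lt_findIdx (xs := List.range (p.length + 1))
    (p := fun d0 => decide (pvG p (pvIter p d0 x) = pvIter p d0 x)) (i := e) h
  rw [List.getElem_range] at this
  simpa using this

theorem pvDist_pos (p : List Int) (hwf : pvWF p) (x : Int) (hx : pvInR p x)
    (hnf : pvG p x ≠ x) : 0 < pvDist p x := by
  rcases Nat.eq_zero_or_pos (pvDist p x) with h | h
  · exfalso
    have := pvDist_fix p hwf x hx
    rw [h] at this
    exact hnf this
  · exact h

theorem pvDist_pg (p : List Int) (hwf : pvWF p) (x : Int) (hx : pvInR p x)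
    (hnf : pvG p x ≠ x) : pvDist p (pvG p x) + 1 = pvDist p x := by
  have hpos := pvDist_pos p hwf x hx hnf
  have hlen := pvDist_le_len p hwf x hx
  have hshift : ∀ k, pvIter p k (pvG p x) = pvIter p (k + 1) x := by
    intro k
    rw [pvIter_succ']
    induction k with
    | zero => rfl
    | succ k ih => rw [pvIter_succ', ih, ← pvIter_succ']
  -- fix at dist x - 1 for pvG p x
  have hfix : pvG p (pvIter p (pvDist p x - 1) (pvG p x)) = pvIter p (pvDist p x - 1) (pvG p x) := by
    rw [hshift]
    have : pvDist p x - 1 + 1 = pvDist p x := by omega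
    rw [this]
    exact pvDist_fix p hwf x hx
  have hle : pvDist p (pvG p x) ≤ pvDist p x - 1 :=
    pvDist_le_of_fix p (pvG p x) _ (by omega) hfix
  -- minimality
  rcases Nat.lt_or_ge (pvDist p (pvG p x)) (pvDist p x - 1) with hlt | hge
  · exfalso
    have hfix2 : pvG p (pvIter p (pvDist p (pvG p x)) (pvG p x)) = pvIter p (pvDist p (pvG p x)) (pvG p x) :=
      pvDist_fix p hwf (pvG p x) (hwf.1 x hx)
    rw [hshift] at hfix2
    exact pvDist_min p x _ (by omega) (by omega) hfix2
  · omega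


-- ---- path compression preserves roots ----

theorem pvInR_congr (p q : List Int) (h : p.length = q.length) (z : Int) :
    pvInR p z → pvInR q z := by
  unfold pvInR
  rw [h]
  exact id

theorem pvCompress_reach (p : List Int) (hwf : pvWF p) (x : Int) (hx : pvInR p x)
    (hnf : pvG p x ≠ x) :
    ∀ z, pvInR p z → ∃ d, d ≤ pvDist p z ∧
      pvIter (pvSet p x (pvG p (pvG p x))) d z = pvRoot p z := by
  set p1 := pvSet p x (pvG p (pvG p x)) with hp1
  have hlen1 : p1.length = p.length := pvSet_length p x _
  have hgx : pvInR p (pvG p x) := hwf.1 x hx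
  have pg1_ne : ∀ z, 0 ≤ z → z ≠ x → pvG p1 z = pvG p z := fun z h0 hne =>
    pvG_pvSet_ne p x _ z h0 hx.1 hne
  have pg1_x : pvG p1 x = pvG p (pvG p x) := pvG_pvSet_self p x _ hx.1 hx.2
  suffices H : ∀ n z, pvInR p z → pvDist p z = n →
      ∃ d, d ≤ pvDist p z ∧ pvIter p1 d z = pvRoot p z by
    intro z hz; exact H (pvDist p z) z hz rfl
  intro n
  induction n using Nat.strong_induction_on with
  | _ n ih =>
    intro z hz hdist
    by_cases hfz : pvG p z = z
    · have hroot : z = pvRoot p z := pvRoot_eq_of_fix p hwf z hz 0 hfz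
      have hzx : z ≠ x := fun h => hnf (h ▸ hfz)
      exact ⟨0, Nat.zero_le _, hroot⟩
    · have hd1 : pvDist p (pvG p z) + 1 = pvDist p z := pvDist_pg p hwf z hz hfz
      by_cases hzx : z = x
      · subst hzx
        set z' := pvG p (pvG p z) with hz'
        have hz'R : pvInR p z' := hwf.1 _ hgx
        have hdz' : pvDist p z' < pvDist p z := by
          rw [hz']
          by_cases hfgx : pvG p (pvG p z) = pvG p z
          · rw [hfgx]; omega
          · have := pvDist_pg p hwf (pvG p z) hgx hfgx
            omega
        obtain ⟨d, hdle, hiter⟩ := ih (pvDist p z') (by omega) z' hz'R rfl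
        have hroots : pvRoot p z' = pvRoot p z := by
          rw [hz', pvRoot_pg p hwf (pvG p z) hgx, pvRoot_pg p hwf z hz]
        refine ⟨d + 1, by omega, ?_⟩
        show pvIter p1 d (pvG p1 z) = pvRoot p z
        rw [pg1_x, hiter, hroots]
      · set z' := pvG p z with hz'
        have hz'R : pvInR p z' := hwf.1 _ hz
        obtain ⟨d, hdle, hiter⟩ := ih (pvDist p z') (by omega) z' hz'R rfl
        have hroots : pvRoot p z' = pvRoot p z := pvRoot_pg p hwf z hz
        refine ⟨d + 1, by omega, ?_⟩
        show pvIter p1 d (pvG p1 z) = pvRoot p z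
        rw [pg1_ne z hz.1 hzx, ← hz', hiter, hroots]

theorem pvCompress_all (p : List Int) (hwf : pvWF p) (x : Int) (hx : pvInR p x)
    (hnf : pvG p x ≠ x) :
    pvWF (pvSet p x (pvG p (pvG p x))) ∧
    (∀ z, pvInR p z → pvRoot (pvSet p x (pvG p (pvG p x))) z = pvRoot p z) ∧
    (∀ z, pvInR p z → pvDist (pvSet p x (pvG p (pvG p x))) z ≤ pvDist p z) := by
  set p1 := pvSet p x (pvG p (pvG p x)) with hp1
  have hlen1 : p1.length = p.length := pvSet_length p x _
  have hgx : pvInR p (pvG p x) := hwf.1 x hx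
  have hggx : pvInR p (pvG p (pvG p x)) := hwf.1 _ hgx
  have pg1_ne : ∀ z, 0 ≤ z → z ≠ x → pvG p1 z = pvG p z := fun z h0 hne =>
    pvG_pvSet_ne p x _ z h0 hx.1 hne
  have pg1_x : pvG p1 x = pvG p (pvG p x) := pvG_pvSet_self p x _ hx.1 hx.2
  have hreach := pvCompress_reach p hwf x hx hnf
  have hrootfix : ∀ z, pvInR p z → pvG p1 (pvRoot p z) = pvRoot p z := by
    intro z hz
    have hfr := pvRoot_fix p hwf z hz
    have hrx : pvRoot p z ≠ x := by
      intro h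
      rw [h] at hfr
      exact hnf hfr
    rw [pg1_ne _ (pvRoot_inR p hwf z hz).1 hrx]
    exact hfr
  have hbounds : ∀ z, pvInR p1 z → pvInR p1 (pvG p1 z) := by
    intro z hz
    have hzp : pvInR p z := pvInR_congr p1 p hlen1 z hz
    by_cases hzx : z = x
    · subst hzx
      rw [pg1_x]
      exact pvInR_congr p p1 hlen1.symm _ hggx
    · rw [pg1_ne z hzp.1 hzx]
      exact pvInR_congr p p1 hlen1.symm _ (hwf.1 z hzp)
  have hwf1 : pvWF p1 := by
    refine ⟨hbounds, ?_⟩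
    intro z hz
    have hzp : pvInR p z := pvInR_congr p1 p hlen1 z hz
    obtain ⟨d, _, hiter⟩ := hreach z hzp
    exact ⟨d, by rw [hiter]; exact hrootfix z hzp⟩
  refine ⟨hwf1, ?_, ?_⟩
  · intro z hz
    obtain ⟨d, _, hiter⟩ := hreach z hz
    have hz1 : pvInR p1 z := pvInR_congr p p1 hlen1.symm z hz
    have := pvRoot_eq_of_fix p1 hwf1 z hz1 d (by rw [hiter]; exact hrootfix z hz)
    rw [← this, hiter]
  · intro z hz
    obtain ⟨d, hdle, hiter⟩ := hreach z hz
    have : pvDist p1 z ≤ d := by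
      apply pvDist_le_of_fix p1 z d
      · rw [hlen1]
        exact le_trans hdle (pvDist_le_len p hwf z hz)
      · rw [hiter]
        exact hrootfix z hz
    omega

-- ---- find returns the root and preserves all roots ----

theorem pvFind_spec : ∀ n p x fuel, pvWF p → pvInR p x → pvDist p x = n → n < fuel →
    (pvFind fuel p x).2 = pvRoot p x ∧ (pvFind fuel p x).1.length = p.length ∧
    pvWF (pvFind fuel p x).1 ∧
    ∀ z, pvInR p z → pvRoot (pvFind fuel p x).1 z = pvRoot p z := by
  intro n
  induction n using Nat.strong_induction_on with
  | _ n ih =>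
    intro p x fuel hwf hx hdist hfuel
    cases fuel with
    | zero => omega
    | succ f =>
      by_cases hnf : pvG p x = x
      · have heq : pvFind (f + 1) p x = (p, x) := by
          have hnn : ¬ (pvG p x ≠ x) := fun h => h hnf
          simp only [pvFind, if_neg hnn]
        rw [heq]
        refine ⟨(pvRoot_eq_of_fix p hwf x hx 0 hnf), rfl, hwf, fun z _ => rfl⟩
      · set gp := pvG p (pvG p x) with hgp
        set p1 := pvSet p x gp with hp1
        have heq : pvFind (f + 1) p x = pvFind f p1 gp := by
          simp only [pvFind, if_pos hnf]
          rfl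
        have hgxR : pvInR p (pvG p x) := hwf.1 x hx
        have hgpR : pvInR p gp := hwf.1 _ hgxR
        have hlen1 : p1.length = p.length := pvSet_length p x _
        obtain ⟨hwf1, hroots1, hdists1⟩ := pvCompress_all p hwf x hx hnf
        have hgp1R : pvInR p1 gp := pvInR_congr p p1 hlen1.symm _ hgpR
        -- distance strictly decreases
        have hdgp : pvDist p gp + 1 ≤ pvDist p x := by
          have h1 := pvDist_pg p hwf x hx hnf
          by_cases hfgx : pvG p (pvG p x) = pvG p x
          · have : gp = pvG p x := hfgx
            rw [this]; omega
          · have h2 := pvDist_pg p hwf (pvG p x) hgxR hfgx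
            rw [← hgp] at h2
            omega
        have hd1 : pvDist p1 gp < n := by
          have h1 : pvDist p1 gp ≤ pvDist p gp := hdists1 gp hgpR
          omega
        obtain ⟨h2a, h2b, h2c, h2d⟩ :=
          ih (pvDist p1 gp) hd1 p1 gp f hwf1 hgp1R rfl (by omega)
        rw [heq]
        refine ⟨?_, by rw [h2b, hlen1], h2c, ?_⟩
        · rw [h2a, hroots1 gp hgpR, hgp,
            pvRoot_pg p hwf (pvG p x) hgxR, pvRoot_pg p hwf x hx]
        · intro z hz
          rw [h2d z (pvInR_congr p p1 hlen1.symm z hz), hroots1 z hz]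

theorem pvFind_spec' (p : List Int) (x : Int) (hwf : pvWF p) (hx : pvInR p x) :
    (pvFind (p.length + 1) p x).2 = pvRoot p x ∧
    (pvFind (p.length + 1) p x).1.length = p.length ∧
    pvWF (pvFind (p.length + 1) p x).1 ∧
    ∀ z, pvInR p z → pvRoot (pvFind (p.length + 1) p x).1 z = pvRoot p z :=
  pvFind_spec (pvDist p x) p x (p.length + 1) hwf hx rfl
    (by have := pvDist_le_len p hwf x hx; omega)

-- ---- linking two roots merges exactly their classes ----

theorem pvLink_all (q : List Int) (hwf : pvWF q) (ra rb : Int)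
    (hra : pvInR q ra) (hrb : pvInR q rb)
    (hfra : pvG q ra = ra) (hfrb : pvG q rb = rb) (hne : ra ≠ rb) :
    pvWF (pvSet q ra rb) ∧
    ∀ z, pvInR q z → pvRoot (pvSet q ra rb) z =
      if pvRoot q z = ra then rb else pvRoot q z := by
  set q2 := pvSet q ra rb with hq2
  have hlen2 : q2.length = q.length := pvSet_length q ra rb
  have pg2_ne : ∀ z, 0 ≤ z → z ≠ ra → pvG q2 z = pvG q z := fun z h0 hz =>
    pvG_pvSet_ne q ra rb z h0 hra.1 hz
  have pg2_ra : pvG q2 ra = rb := pvG_pvSet_self q ra rb hra.1 hra.2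
  have htgtfix : ∀ z, pvInR q z →
      pvG q2 (if pvRoot q z = ra then rb else pvRoot q z) =
      (if pvRoot q z = ra then rb else pvRoot q z) := by
    intro z hz
    split
    · rw [pg2_ne rb hrb.1 (Ne.symm hne)]
      exact hfrb
    · next h =>
      rw [pg2_ne _ (pvRoot_inR q hwf z hz).1 h]
      exact pvRoot_fix q hwf z hz
  have hreach : ∀ z, pvInR q z →
      ∃ d, pvIter q2 d z = (if pvRoot q z = ra then rb else pvRoot q z) := by
    suffices H : ∀ n z, pvInR q z → pvDist q z = n →
        ∃ d, pvIter q2 d z = (if pvRoot q z = ra then rb else pvRoot q z) by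
      intro z hz; exact H (pvDist q z) z hz rfl
    intro n
    induction n using Nat.strong_induction_on with
    | _ n ih =>
      intro z hz hdist
      by_cases hfz : pvG q z = z
      · have hroot : z = pvRoot q z := pvRoot_eq_of_fix q hwf z hz 0 hfz
        by_cases hzra : z = ra
        · subst hzra
          rw [← hroot, if_pos rfl]
          exact ⟨1, pg2_ra⟩
        · rw [← hroot, if_neg hzra]
          exact ⟨0, rfl⟩
      · have hzra : z ≠ ra := fun h => hfz (h ▸ hfra)
        have hd1 : pvDist q (pvG q z) + 1 = pvDist q z := pvDist_pg q hwf z hz hfz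
        obtain ⟨d, hiter⟩ := ih (pvDist q (pvG q z)) (by omega) (pvG q z) (hwf.1 z hz) rfl
        refine ⟨d + 1, ?_⟩
        show pvIter q2 d (pvG q2 z) = _
        rw [pg2_ne z hz.1 hzra, hiter, pvRoot_pg q hwf z hz]
  have hbounds : ∀ z, pvInR q2 z → pvInR q2 (pvG q2 z) := by
    intro z hz
    have hzq : pvInR q z := pvInR_congr q2 q hlen2 z hz
    by_cases hzra : z = ra
    · subst hzra
      rw [pg2_ra]
      exact pvInR_congr q q2 hlen2.symm _ hrb
    · rw [pg2_ne z hzq.1 hzra]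
      exact pvInR_congr q q2 hlen2.symm _ (hwf.1 z hzq)
  have hwf2 : pvWF q2 := by
    refine ⟨hbounds, ?_⟩
    intro z hz
    have hzq : pvInR q z := pvInR_congr q2 q hlen2 z hz
    obtain ⟨d, hiter⟩ := hreach z hzq
    exact ⟨d, by rw [hiter]; exact htgtfix z hzq⟩
  refine ⟨hwf2, ?_⟩
  intro z hz
  obtain ⟨d, hiter⟩ := hreach z hz
  have hz2 : pvInR q2 z := pvInR_congr q q2 hlen2.symm z hz
  have := pvRoot_eq_of_fix q2 hwf2 z hz2 d (by rw [hiter]; exact htgtfix z hz)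
  rw [← this, hiter]

-- ---- union merges exactly the classes of its arguments ----

theorem pvUnion_spec (p : List Int) (a b : Int) (hwf : pvWF p)
    (ha : pvInR p a) (hb : pvInR p b) :
    (pvUnion p a b).length = p.length ∧ pvWF (pvUnion p a b) ∧
    ∀ z, pvInR p z → pvRoot (pvUnion p a b) z =
      if pvRoot p z = pvRoot p a then pvRoot p b else pvRoot p z := by
  obtain ⟨ha2, halen, hawf, haroots⟩ := pvFind_spec' p a hwf ha
  set fa := pvFind (p.length + 1) p a with hfa
  have hblenEq : fa.1.length + 1 = p.length + 1 := by rw [halen]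
  have hbR : pvInR fa.1 b := pvInR_congr p fa.1 halen.symm b hb
  obtain ⟨hb2, hblen, hbwf, hbroots⟩ := pvFind_spec' fa.1 b hawf hbR
  set fb := pvFind (fa.1.length + 1) fa.1 b with hfb
  have hfb2 : fb.2 = pvRoot p b := by
    rw [hb2, haroots b hb]
  have hUeq : pvUnion p a b = if fa.2 ≠ fb.2 then pvSet fb.1 fa.2 fb.2 else fb.1 := by
    rfl
  have hlenfb : fb.1.length = p.length := by rw [hblen, halen]
  have hfbroots : ∀ z, pvInR p z → pvRoot fb.1 z = pvRoot p z := by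
    intro z hz
    rw [hbroots z (pvInR_congr p fa.1 halen.symm z hz), haroots z hz]
  by_cases hcase : fa.2 = fb.2
  · rw [hUeq, if_neg (by simpa using hcase)]
    refine ⟨hlenfb, hbwf, ?_⟩
    intro z hz
    rw [hfbroots z hz]
    have hab : pvRoot p a = pvRoot p b := by rw [← ha2, ← hfb2, hcase]
    split
    · next h => rw [← hab, ← h]
    · rfl
  · rw [hUeq, if_pos (by simpa using hcase)]
    have hraR : pvInR fb.1 fa.2 := by
      rw [ha2]
      exact pvInR_congr p fb.1 hlenfb.symm _ (pvRoot_inR p hwf a ha)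
    have hrbR : pvInR fb.1 fb.2 := by
      rw [hfb2]
      exact pvInR_congr p fb.1 hlenfb.symm _ (pvRoot_inR p hwf b hb)
    have hA : fa.2 = pvRoot fb.1 a := by rw [ha2, hfbroots a ha]
    have hB : fb.2 = pvRoot fb.1 b := by rw [hfb2, hfbroots b hb]
    have hfixra : pvG fb.1 fa.2 = fa.2 := by
      rw [hA]
      exact pvRoot_fix fb.1 hbwf a (pvInR_congr p fb.1 hlenfb.symm a ha)
    have hfixrb : pvG fb.1 fb.2 = fb.2 := by
      rw [hB]
      exact pvRoot_fix fb.1 hbwf b (pvInR_congr p fb.1 hlenfb.symm b hb)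
    obtain ⟨hwf2, hroots2⟩ := pvLink_all fb.1 hbwf fa.2 fb.2 hraR hrbR hfixra hfixrb hcase
    refine ⟨by rw [pvSet_length, hlenfb], hwf2, ?_⟩
    intro z hz
    rw [hroots2 z (pvInR_congr p fb.1 hlenfb.symm z hz), hfbroots z hz, ha2, hfb2]

-- ---- Python's negative-index aliasing: vertex x names slot x + len ----

def pvWrap (N : Nat) (x : Int) : Int := if x < 0 then x + N else x

theorem pvWrap_inR (p : List Int) (x : Int) (h1 : -(p.length : Int) ≤ x)
    (h2 : x < (p.length : Int)) : pvInR p (pvWrap p.length x) := by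
  unfold pvWrap pvInR
  split <;> omega

theorem pvG_neg (l : List Int) (x : Int) (h0 : x < 0) (h1 : 0 ≤ x + l.length) :
    pvG l x = pvG l (x + l.length) := by
  unfold pvG PySem.List.pyGetD
  have hx : x = -(((-x).toNat : Nat) : Int) := by omega
  rw [hx, PySem.List.pyGet?_neg_natCast l (-x).toNat (by omega) (by omega)]
  rw [PySem.List.pyGet?_of_nonneg l (by omega)]
  have : l.length - (-x).toNat = (-(((-x).toNat : Nat) : Int) + l.length).toNat := by omega
  rw [this]

theorem pvG_wrap (l : List Int) (x : Int) (h1 : -(l.length : Int) ≤ x)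
    (h2 : x < (l.length : Int)) : pvG l x = pvG l (pvWrap l.length x) := by
  unfold pvWrap
  split
  · next h => exact pvG_neg l x h (by omega)
  · rfl

theorem pvSet_neg {α : Type} (l : List α) (x : Int) (v : α) (h0 : x < 0)
    (h1 : 0 ≤ x + l.length) : pvSet l x v = pvSet l (x + l.length) v := by
  unfold pvSet
  rw [if_neg (by omega), if_pos ⟨h0, h1⟩, if_pos (by constructor <;> omega)]

theorem pvFind_root (fuel : Nat) (hf : 1 ≤ fuel) (p : List Int) (y : Int)
    (h : pvG p y = y) : pvFind fuel p y = (p, y) := by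
  cases fuel with
  | zero => omega
  | succ f => simp only [pvFind, if_neg (show ¬ (pvG p y ≠ y) from fun hh => hh h)]

theorem pvFind_neg (p : List Int) (x : Int) (hwf : pvWF p) (h0 : x < 0)
    (h1 : 0 ≤ x + p.length) :
    pvFind (p.length + 1) p x = pvFind (p.length + 1) p (x + p.length) := by
  have hN : 1 ≤ p.length := by omega
  have hxR : pvInR p (x + p.length) := by unfold pvInR; omega
  have hgx : pvG p x = pvG p (x + p.length) := pvG_neg p x h0 h1
  have hw : pvInR p (pvG p (x + p.length)) := hwf.1 _ hxR
  have hcondL : pvG p x ≠ x := by rw [hgx]; rcases hw with ⟨hw1, _⟩; omega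
  by_cases hroot : pvG p (x + p.length) = x + p.length
  · -- the wrapped slot is a root: A's loop does one value-preserving write, then stops
    have hget : p[(x + (p.length : Int)).toNat]'(by omega) = x + p.length := by
      rw [← pvG_eq p (x + p.length) (by omega) (by omega)]
      exact hroot
    have hset : pvSet p x (pvG p (pvG p x)) = p := by
      rw [pvSet_neg p x _ h0 h1, hgx, hroot, hroot]
      unfold pvSet
      rw [if_pos (by constructor <;> omega)]
      have hss := List.set_getElem_self
        (show (x + (p.length : Int)).toNat < p.length from by omega)
      rw [hget] at hss
      exact hss
    have hL : pvFind (p.length + 1) p x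
        = pvFind p.length p (pvG p (pvG p x)) := by
      simp only [pvFind, if_pos hcondL]
      rw [hset]
    rw [hL, hgx, hroot, hroot]
    rw [pvFind_root p.length hN p _ hroot, pvFind_root (p.length + 1) (by omega) p _ hroot]
  · -- not a root: both sides take the same compression step
    have hcondR : pvG p (x + p.length) ≠ x + p.length := hroot
    simp only [pvFind, if_pos hcondL, if_pos hcondR]
    rw [hgx, pvSet_neg p x _ h0 h1]

theorem pvUnion_wrap (p : List Int) (hwf : pvWF p) (a b : Int)
    (ha1 : -(p.length : Int) ≤ a) (ha2 : a < (p.length : Int))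
    (hb1 : -(p.length : Int) ≤ b) (hb2 : b < (p.length : Int)) :
    pvUnion p a b = pvUnion p (pvWrap p.length a) (pvWrap p.length b) := by
  have hwaR : pvInR p (pvWrap p.length a) := pvWrap_inR p a ha1 ha2
  have hfa : pvFind (p.length + 1) p a = pvFind (p.length + 1) p (pvWrap p.length a) := by
    unfold pvWrap
    split
    · exact pvFind_neg p a hwf (by omega) (by omega)
    · rfl
  have h1 : pvUnion p a b = pvUnion p (pvWrap p.length a) b := by
    simp only [pvUnion]
    rw [hfa]
  rw [h1]
  obtain ⟨_, hqlen, hqwf, _⟩ := pvFind_spec' p (pvWrap p.length a) hwf hwaR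
  set q := (pvFind (p.length + 1) p (pvWrap p.length a)).1 with hq
  have hfb : pvFind (q.length + 1) q b = pvFind (q.length + 1) q (pvWrap p.length b) := by
    unfold pvWrap
    split
    · next hbneg =>
      have := pvFind_neg q b hqwf (by omega) (by rw [hqlen]; omega)
      rw [this]
      have harg : b + (q.length : Int) = b + (p.length : Int) := by rw [hqlen]
      rw [harg]
    · rfl
  simp only [pvUnion]
  rw [← hq, hfb]

theorem pvFoldWrap (N : Nat) (edges : List (Int × Int)) : ∀ (p : List Int),
    p.length = N → pvWF p →
    (∀ e ∈ edges, (-(N : Int) ≤ e.1 ∧ e.1 < (N : Int)) ∧ (-(N : Int) ≤ e.2 ∧ e.2 < (N : Int))) →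
    edges.foldl (fun p e => pvUnion p e.1 e.2) p
      = (edges.map (fun e => (pvWrap N e.1, pvWrap N e.2))).foldl
          (fun p e => pvUnion p e.1 e.2) p := by
  induction edges with
  | nil => intro p _ _ _; rfl
  | cons e rest ih =>
    intro p hlen hwf hb
    obtain ⟨⟨h1, h2⟩, ⟨h3, h4⟩⟩ := hb e List.mem_cons_self
    have heq : pvUnion p e.1 e.2 = pvUnion p (pvWrap N e.1) (pvWrap N e.2) := by
      rw [← hlen] at h1 h2 h3 h4 ⊢
      exact pvUnion_wrap p hwf e.1 e.2 h1 h2 h3 h4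
    have hw1 : pvInR p (pvWrap p.length e.1) := pvWrap_inR p e.1 (by omega) (by omega)
    have hw2 : pvInR p (pvWrap p.length e.2) := pvWrap_inR p e.2 (by omega) (by omega)
    obtain ⟨hulen, huwf, _⟩ :=
      pvUnion_spec p (pvWrap p.length e.1) (pvWrap p.length e.2) hwf hw1 hw2
    have hwrapeq : pvUnion p (pvWrap p.length e.1) (pvWrap p.length e.2)
        = pvUnion p (pvWrap N e.1) (pvWrap N e.2) := by rw [hlen]
    show (rest.foldl (fun p e => pvUnion p e.1 e.2) (pvUnion p e.1 e.2)) = _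
    rw [heq, ih (pvUnion p (pvWrap N e.1) (pvWrap N e.2))
      (by rw [← hwrapeq, hulen, hlen]) (by rw [← hwrapeq]; exact huwf)
      (fun e' he' => hb e' (List.mem_cons_of_mem _ he'))]
    rfl

-- ---- the root-collecting fold of A, with raw (possibly negative) vertex names ----

theorem pvCountFoldW (verts : List Int) : ∀ (p : List Int) (acc : PySem.Set Int),
    pvWF p → (∀ v ∈ verts, -(p.length : Int) ≤ v ∧ v < (p.length : Int)) →
    (verts.foldl (fun (st : List Int × PySem.Set Int) v =>
        ((pvFind (st.1.length + 1) st.1 v).1,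
          PySem.Set.add st.2 (pvFind (st.1.length + 1) st.1 v).2)) (p, acc)).2
    = verts.foldl (fun s v => PySem.Set.add s (pvRoot p (pvWrap p.length v))) acc := by
  induction verts with
  | nil => intro p acc _ _; rfl
  | cons v vs ih =>
    intro p acc hwf hR
    obtain ⟨hv1, hv2⟩ := hR v List.mem_cons_self
    have hfr : pvFind (p.length + 1) p v = pvFind (p.length + 1) p (pvWrap p.length v) := by
      unfold pvWrap
      split
      · exact pvFind_neg p v hwf (by omega) (by omega)
      · rfl
    have hwv : pvInR p (pvWrap p.length v) := pvWrap_inR p v hv1 hv2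
    obtain ⟨hf2, hflen, hfwf, hfroots⟩ := pvFind_spec' p (pvWrap p.length v) hwf hwv
    show (vs.foldl _ ((pvFind (p.length + 1) p v).1,
        PySem.Set.add acc (pvFind (p.length + 1) p v).2)).2 = _
    rw [hfr]
    set fr := pvFind (p.length + 1) p (pvWrap p.length v) with hfrd
    have hRvs : ∀ v' ∈ vs, -(fr.1.length : Int) ≤ v' ∧ v' < (fr.1.length : Int) := by
      intro v' hv'
      rw [hflen]
      exact hR v' (List.mem_cons_of_mem _ hv')
    rw [ih fr.1 (PySem.Set.add acc fr.2) hfwf hRvs]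
    rw [hf2]
    apply PySem.List.foldl_congr_mem
    intro acc' x hx
    have hx1 := (hR x (List.mem_cons_of_mem _ hx)).1
    have hx2 := (hR x (List.mem_cons_of_mem _ hx)).2
    have hwx : pvInR p (pvWrap p.length x) := pvWrap_inR p x hx1 hx2
    rw [hflen, hfroots _ hwx]

-- ---- the coupling invariant between A's union-find and B's colour array ----

theorem pvMergeEq (ri rj A B : Int) (h : ri ≠ rj) :
    ((if A = ri then rj else A) = (if B = ri then rj else B)) ↔
    (A = B ∨ (A = ri ∧ B = rj) ∨ (A = rj ∧ B = ri)) := by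
  split_ifs <;> omega

theorem pvMergeEq' (ri rj A B : Int) (h : ri ≠ rj) :
    ((if A = ri then rj else A) = (if B = ri then rj else B)) ↔
    (A = B ∨ (A = rj ∧ B = ri) ∨ (A = ri ∧ B = rj)) := by
  split_ifs <;> omega

theorem pvPaintLen (d : Int) : ∀ (L lab : List Int),
    (L.foldl (fun l v => pvSet l v d) lab).length = lab.length := by
  intro L
  induction L with
  | nil => intro lab; rfl
  | cons u rest ih =>
    intro lab
    show (rest.foldl _ (pvSet lab u d)).length = _
    rw [ih, pvSet_length]

theorem pvPaintG (d : Int) : ∀ (L lab : List Int) (z : Int),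
    (∀ v ∈ L, pvInR lab v) → 0 ≤ z → z < (lab.length : Int) →
    pvG (L.foldl (fun l v => pvSet l v d) lab) z = if z ∈ L then d else pvG lab z := by
  intro L
  induction L with
  | nil => intro lab z _ _ _; simp
  | cons u rest ih =>
    intro lab z hin h0 h1
    obtain ⟨hu0, hu1⟩ := hin u List.mem_cons_self
    show pvG (rest.foldl _ (pvSet lab u d)) z = _
    rw [ih (pvSet lab u d) z
      (fun v hv => by
        have hvv := hin v (List.mem_cons_of_mem _ hv)
        unfold pvInR at hvv ⊢
        rw [pvSet_length]
        exact hvv)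
      h0 (by rw [pvSet_length]; exact h1)]
    by_cases hzr : z ∈ rest
    · rw [if_pos hzr, if_pos (List.mem_cons_of_mem _ hzr)]
    · rw [if_neg hzr]
      by_cases hzu : z = u
      · subst hzu
        rw [pvG_pvSet_self lab z d h0 h1, if_pos List.mem_cons_self]
      · rw [pvG_pvSet_ne lab u d z h0 hu0 hzu,
          if_neg (by simp [List.mem_cons, hzu, hzr])]

-- the members dict lists, for every colour in use, exactly that colour's vertices
def pvCInv (lab : List Int) (mem : PySem.Dict Int (List Int)) : Prop :=
  ∀ c w, pvInR lab w → pvG lab w = c →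
    (∀ v ∈ mem.getD c [c], pvInR lab v) ∧
    (∀ v, pvInR lab v → (pvG lab v = c ↔ v ∈ mem.getD c [c]))

theorem pvPaint_spec (lab : List Int) (mem : PySem.Dict Int (List Int)) (li lj : Int)
    (hcinv : pvCInv lab mem) (hne : li ≠ lj)
    (wi : Int) (hwi : pvInR lab wi) (hwic : pvG lab wi = li)
    (wj : Int) (hwj : pvInR lab wj) (hwjc : pvG lab wj = lj) :
    (pvPaint lab mem li lj).1.length = lab.length ∧
    (∀ z, pvInR lab z → pvG (pvPaint lab mem li lj).1 z
        = if pvG lab z = li then lj else pvG lab z) ∧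
    pvCInv (pvPaint lab mem li lj).1 (pvPaint lab mem li lj).2 := by
  obtain ⟨hsIn, hsIff⟩ := hcinv li wi hwi hwic
  obtain ⟨hbIn, hbIff⟩ := hcinv lj wj hwj hwjc
  set small := mem.getD li [li] with hsm
  set lab1 := small.foldl (fun l v => pvSet l v lj) lab with hlab1
  have h1 : (pvPaint lab mem li lj).1 = lab1 := rfl
  have h2 : (pvPaint lab mem li lj).2 = mem.insert lj (mem.getD lj [lj] ++ small) := rfl
  have hlen : lab1.length = lab.length := pvPaintLen lj small lab
  have htr : ∀ v, pvInR lab1 v ↔ pvInR lab v := by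
    intro v; unfold pvInR; rw [hlen]
  have hform : ∀ z, pvInR lab z → pvG lab1 z = if pvG lab z = li then lj else pvG lab z := by
    intro z hz
    rw [hlab1, pvPaintG lj small lab z hsIn hz.1 hz.2]
    by_cases h : pvG lab z = li
    · rw [if_pos ((hsIff z hz).mp h), if_pos h]
    · rw [if_neg (fun hm => h ((hsIff z hz).mpr hm)), if_neg h]
  refine ⟨by rw [h1]; exact hlen, by rw [h1]; exact hform, ?_⟩
  rw [h1, h2]
  intro c w hw1 hw2
  have hwlab : pvInR lab w := (htr w).mp hw1
  rw [hform w hwlab] at hw2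
  by_cases hcj : c = lj
  · subst hcj
    rw [PySem.Dict.getD_insert, if_pos rfl]
    constructor
    · intro v hv
      rw [htr]
      rcases List.mem_append.mp hv with h | h
      · exact hbIn v h
      · exact hsIn v h
    · intro v hv
      have hvlab := (htr v).mp hv
      rw [hform v hvlab, List.mem_append, ← hbIff v hvlab, ← hsIff v hvlab]
      by_cases h : pvG lab v = li
      · rw [if_pos h]
        exact ⟨fun _ => Or.inr h, fun _ => rfl⟩
      · rw [if_neg h]
        exact ⟨fun hh => Or.inl hh, fun hh => hh.elim id (fun hh' => absurd hh' h)⟩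
  · have hwold : pvG lab w = c := by
      by_cases h : pvG lab w = li
      · rw [if_pos h] at hw2
        exact absurd hw2.symm hcj
      · rw [if_neg h] at hw2
        exact hw2
    have hcli : c ≠ li := by
      intro hcl
      by_cases h : pvG lab w = li
      · rw [if_pos h] at hw2
        exact hcj hw2.symm
      · exact h (hwold.trans hcl)
    obtain ⟨hcIn, hcIff⟩ := hcinv c w hwlab hwold
    rw [PySem.Dict.getD_insert, if_neg hcj]
    constructor
    · intro v hv
      rw [htr]
      exact hcIn v hv
    · intro v hv
      have hvlab := (htr v).mp hv
      rw [hform v hvlab, ← hcIff v hvlab]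
      by_cases h : pvG lab v = li
      · rw [if_pos h]
        exact ⟨fun hh => absurd hh.symm hcj, fun hh => absurd (h.symm.trans hh).symm hcli⟩
      · rw [if_neg h]

theorem pvRecolor_length (st : List Int × PySem.Dict Int (List Int)) (e : Int × Int) :
    (pvRecolor st e).1.length = st.1.length := by
  unfold pvRecolor
  split
  · rfl
  · split <;> exact pvPaintLen _ _ _

theorem pvRecolor_wrap (st : List Int × PySem.Dict Int (List Int)) (i j : Int)
    (hi1 : -(st.1.length : Int) ≤ i) (hi2 : i < (st.1.length : Int))
    (hj1 : -(st.1.length : Int) ≤ j) (hj2 : j < (st.1.length : Int)) :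
    pvRecolor st (i, j) = pvRecolor st (pvWrap st.1.length i, pvWrap st.1.length j) := by
  unfold pvRecolor
  rw [← pvG_wrap st.1 i hi1 hi2, ← pvG_wrap st.1 j hj1 hj2]

theorem pvFoldWrapB (N : Nat) (edges : List (Int × Int)) :
    ∀ (st : List Int × PySem.Dict Int (List Int)),
    st.1.length = N →
    (∀ e ∈ edges, (-(N : Int) ≤ e.1 ∧ e.1 < (N : Int)) ∧ (-(N : Int) ≤ e.2 ∧ e.2 < (N : Int))) →
    edges.foldl pvRecolor st
      = (edges.map (fun e => (pvWrap N e.1, pvWrap N e.2))).foldl pvRecolor st := by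
  induction edges with
  | nil => intro st _ _; rfl
  | cons e rest ih =>
    intro st hlen hb
    obtain ⟨⟨h1, h2⟩, ⟨h3, h4⟩⟩ := hb e List.mem_cons_self
    have heq : pvRecolor st e = pvRecolor st (pvWrap N e.1, pvWrap N e.2) := by
      rw [← hlen] at h1 h2 h3 h4 ⊢
      exact pvRecolor_wrap st e.1 e.2 h1 h2 h3 h4
    show rest.foldl pvRecolor (pvRecolor st e) = _
    rw [heq, ih (pvRecolor st (pvWrap N e.1, pvWrap N e.2))
      (by rw [pvRecolor_length, hlen]) (fun e' he' => hb e' (List.mem_cons_of_mem _ he'))]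
    rfl

theorem pvStep2 (p lab : List Int) (mem : PySem.Dict Int (List Int)) (wi wj : Int)
    (hwf : pvWF p) (hlen : lab.length = p.length)
    (hiff : ∀ a b, pvInR p a → pvInR p b →
      (pvRoot p a = pvRoot p b ↔ pvG lab a = pvG lab b))
    (hcinv : pvCInv lab mem) (hi : pvInR p wi) (hj : pvInR p wj) :
    pvWF (pvUnion p wi wj) ∧ (pvUnion p wi wj).length = p.length ∧
    (pvRecolor (lab, mem) (wi, wj)).1.length = p.length ∧
    pvCInv (pvRecolor (lab, mem) (wi, wj)).1 (pvRecolor (lab, mem) (wi, wj)).2 ∧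
    ∀ a b, pvInR p a → pvInR p b →
      (pvRoot (pvUnion p wi wj) a = pvRoot (pvUnion p wi wj) b ↔
       pvG (pvRecolor (lab, mem) (wi, wj)).1 a = pvG (pvRecolor (lab, mem) (wi, wj)).1 b) := by
  obtain ⟨hUlen, hUwf, hUroots⟩ := pvUnion_spec p wi wj hwf hi hj
  have hilab : pvInR lab wi := by unfold pvInR at hi ⊢; rw [hlen]; exact hi
  have hjlab : pvInR lab wj := by unfold pvInR at hj ⊢; rw [hlen]; exact hj
  have htrp : ∀ v, pvInR lab v ↔ pvInR p v := by
    intro v; unfold pvInR; rw [hlen]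
  by_cases hc : pvG lab wi = pvG lab wj
  · have hR : pvRecolor (lab, mem) (wi, wj) = (lab, mem) := by
      unfold pvRecolor
      rw [if_pos hc]
    have hrij : pvRoot p wi = pvRoot p wj := (hiff wi wj hi hj).mpr hc
    have hroots_id : ∀ z, pvInR p z → pvRoot (pvUnion p wi wj) z = pvRoot p z := by
      intro z hz
      rw [hUroots z hz]
      split
      · next h => rw [← hrij, ← h]
      · rfl
    rw [hR]
    refine ⟨hUwf, hUlen, hlen, hcinv, ?_⟩
    intro a b ha hb
    rw [hroots_id a ha, hroots_id b hb]
    exact hiff a b ha hb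
  · have hrij : pvRoot p wi ≠ pvRoot p wj := fun h => hc ((hiff wi wj hi hj).mp h)
    by_cases hsz : (mem.getD (pvG lab wi) [pvG lab wi]).length
        > (mem.getD (pvG lab wj) [pvG lab wj]).length
    · -- repaint wj's colour class with wi's colour
      have hR : pvRecolor (lab, mem) (wi, wj)
          = pvPaint lab mem (pvG lab wj) (pvG lab wi) := by
        unfold pvRecolor
        rw [if_neg hc, if_pos hsz]
      obtain ⟨hl, hform, hcinv'⟩ := pvPaint_spec lab mem (pvG lab wj) (pvG lab wi) hcinv
        (Ne.symm hc) wj hjlab rfl wi hilab rfl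
      rw [hR]
      refine ⟨hUwf, hUlen, by rw [hl, hlen], hcinv', ?_⟩
      intro a b ha hb
      rw [hUroots a ha, hUroots b hb,
        hform a ((htrp a).mpr ha), hform b ((htrp b).mpr hb),
        pvMergeEq _ _ _ _ hrij, pvMergeEq' _ _ _ _ (Ne.symm hc)]
      have e1 := hiff a b ha hb
      have e2 := hiff a wi ha hi
      have e3 := hiff a wj ha hj
      have e4 := hiff b wi hb hi
      have e5 := hiff b wj hb hj
      rw [e1, e2, e3, e4, e5]
    · -- repaint wi's colour class with wj's colour
      have hR : pvRecolor (lab, mem) (wi, wj)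
          = pvPaint lab mem (pvG lab wi) (pvG lab wj) := by
        unfold pvRecolor
        rw [if_neg hc, if_neg hsz]
      obtain ⟨hl, hform, hcinv'⟩ := pvPaint_spec lab mem (pvG lab wi) (pvG lab wj) hcinv
        hc wi hilab rfl wj hjlab rfl
      rw [hR]
      refine ⟨hUwf, hUlen, by rw [hl, hlen], hcinv', ?_⟩
      intro a b ha hb
      rw [hUroots a ha, hUroots b hb,
        hform a ((htrp a).mpr ha), hform b ((htrp b).mpr hb),
        pvMergeEq _ _ _ _ hrij, pvMergeEq _ _ _ _ hc]
      have e1 := hiff a b ha hb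
      have e2 := hiff a wi ha hi
      have e3 := hiff a wj ha hj
      have e4 := hiff b wi hb hi
      have e5 := hiff b wj hb hj
      rw [e1, e2, e3, e4, e5]

theorem pvFold2 (edges : List (Int × Int)) :
    ∀ (p lab : List Int) (mem : PySem.Dict Int (List Int)),
    pvWF p → lab.length = p.length →
    (∀ a b, pvInR p a → pvInR p b →
      (pvRoot p a = pvRoot p b ↔ pvG lab a = pvG lab b)) →
    pvCInv lab mem →
    (∀ e ∈ edges, pvInR p e.1 ∧ pvInR p e.2) →
    pvWF (edges.foldl (fun p e => pvUnion p e.1 e.2) p) ∧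
    (edges.foldl (fun p e => pvUnion p e.1 e.2) p).length = p.length ∧
    (edges.foldl pvRecolor (lab, mem)).1.length = p.length ∧
    ∀ a b, pvInR p a → pvInR p b →
      (pvRoot (edges.foldl (fun p e => pvUnion p e.1 e.2) p) a
         = pvRoot (edges.foldl (fun p e => pvUnion p e.1 e.2) p) b ↔
       pvG (edges.foldl pvRecolor (lab, mem)).1 a
         = pvG (edges.foldl pvRecolor (lab, mem)).1 b) := by
  induction edges with
  | nil => intro p lab mem hwf hlen hiff _ _; exact ⟨hwf, rfl, hlen, hiff⟩
  | cons e rest ih =>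
    intro p lab mem hwf hlen hiff hcinv hR
    obtain ⟨hi, hj⟩ := hR e (List.mem_cons_self)
    obtain ⟨hwf1, hUlen, hRlen, hcinv1, hiff1⟩ :=
      pvStep2 p lab mem e.1 e.2 hwf hlen hiff hcinv hi hj
    set p1 := pvUnion p e.1 e.2 with hp1
    have hee : pvRecolor (lab, mem) (e.1, e.2) = pvRecolor (lab, mem) e := rfl
    rw [hee] at hRlen hcinv1 hiff1
    set st1 := pvRecolor (lab, mem) e with hst1
    have htr : ∀ z, pvInR p1 z ↔ pvInR p z :=
      fun z => ⟨pvInR_congr p1 p hUlen z, pvInR_congr p p1 hUlen.symm z⟩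
    have hiff1' : ∀ a b, pvInR p1 a → pvInR p1 b →
        (pvRoot p1 a = pvRoot p1 b ↔ pvG st1.1 a = pvG st1.1 b) := by
      intro a b ha hb
      exact hiff1 a b ((htr a).mp ha) ((htr b).mp hb)
    have hRrest : ∀ e' ∈ rest, pvInR p1 e'.1 ∧ pvInR p1 e'.2 := by
      intro e' he'
      obtain ⟨h1, h2⟩ := hR e' (List.mem_cons_of_mem _ he')
      exact ⟨(htr e'.1).mpr h1, (htr e'.2).mpr h2⟩
    obtain ⟨hwf2, hlen2, hlen3, hiff2⟩ :=
      ih p1 st1.1 st1.2 hwf1 (by rw [hRlen, hUlen]) hiff1' hcinv1 hRrest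
    refine ⟨?_, ?_, ?_, ?_⟩
    · show pvWF (rest.foldl _ p1)
      exact hwf2
    · show (rest.foldl _ p1).length = p.length
      rw [hlen2, hUlen]
    · show (rest.foldl pvRecolor st1).1.length = p.length
      rw [hlen3, hUlen]
    · intro a b ha hb
      show pvRoot (rest.foldl _ p1) a = pvRoot (rest.foldl _ p1) b ↔
        pvG (rest.foldl pvRecolor st1).1 a = pvG (rest.foldl pvRecolor st1).1 b
      exact hiff2 a b ((htr a).mpr ha) ((htr b).mpr hb)

-- ---- equal partitions give equal distinct-image counts ----

theorem pvSetLenCongr (l : List Int) (f g : Int → Int)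
    (h : ∀ a ∈ l, ∀ b ∈ l, (f a = f b ↔ g a = g b)) :
    ∀ (s t : PySem.Set Int), s.length = t.length →
    (∀ a ∈ l, (f a ∈ s ↔ g a ∈ t)) →
    (l.foldl (fun s' v => PySem.Set.add s' (f v)) s).length
      = (l.foldl (fun t' v => PySem.Set.add t' (g v)) t).length := by
  induction l with
  | nil => intro s t hlen _; exact hlen
  | cons a rest ih =>
    intro s t hlen hmem
    have hm := hmem a (List.mem_cons_self)
    have hlen' : (PySem.Set.add s (f a)).length = (PySem.Set.add t (g a)).length := by
      unfold PySem.Set.add PySem.Set.contains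
      by_cases hfa : f a ∈ s
      · rw [if_pos (by rw [List.contains_iff_mem]; exact hfa),
          if_pos (by rw [List.contains_iff_mem]; exact hm.mp hfa)]
        exact hlen
      · rw [if_neg (by rw [List.contains_iff_mem]; exact hfa),
          if_neg (by rw [List.contains_iff_mem]; exact fun hg => hfa (hm.mpr hg))]
        simp [hlen]
    apply ih (fun a' ha' b hb => h a' (List.mem_cons_of_mem _ ha') b (List.mem_cons_of_mem _ hb))
      _ _ hlen'
    intro b hb
    rw [PySem.Set.mem_add, PySem.Set.mem_add]
    constructor
    · rintro (h1 | h1)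
      · exact Or.inl ((hmem b (List.mem_cons_of_mem _ hb)).mp h1)
      · exact Or.inr ((h b (List.mem_cons_of_mem _ hb) a (List.mem_cons_self)).mp h1)
    · rintro (h1 | h1)
      · exact Or.inl ((hmem b (List.mem_cons_of_mem _ hb)).mpr h1)
      · exact Or.inr ((h b (List.mem_cons_of_mem _ hb) a (List.mem_cons_self)).mpr h1)

-- ---- generic read/write lemmas for pvSet with pyGetD ----

theorem pvSet_getD_self {α : Type} (l : List α) (x : Int) (v d : α)
    (h0 : 0 ≤ x) (h1 : x.toNat < l.length) :
    PySem.List.pyGetD (pvSet l x v) x d = v := by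
  unfold pvSet
  rw [if_pos ⟨h0, h1⟩]
  rw [PySem.List.pyGetD_eq_getElem _ _ h0 (by simp only [List.length_set]; omega)]
  exact List.getElem_set_self _

theorem pvSet_getD_ne {α : Type} (l : List α) (x y : Int) (v d : α)
    (h0 : 0 ≤ y) (hy : y.toNat < l.length) (hx0 : 0 ≤ x) (hne : y ≠ x) :
    PySem.List.pyGetD (pvSet l x v) y d = PySem.List.pyGetD l y d := by
  unfold pvSet
  split
  · rw [PySem.List.pyGetD_eq_getElem _ _ h0 (by simp only [List.length_set]; omega),
      PySem.List.pyGetD_eq_getElem _ _ h0 (by omega)]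
    exact List.getElem_set_ne (by omega) _
  · rw [if_neg (show ¬ (x < 0 ∧ 0 ≤ x + (l.length : Int)) from by omega)]

-- ---- the F2 column reductions of A and B run in lockstep ----

theorem pvRed_lockstep (ci : Int) (hci0 : 0 ≤ ci) :
    ∀ (fuel : Nat) (col : PySem.Set Int) (cols : List (PySem.Set Int))
      (pr : PySem.Dict Int Int) (pivots : PySem.Dict Int (PySem.Set Int)) (rank : Int),
    ci.toNat < cols.length →
    (∀ top pj, pr.get? top = some pj → 0 ≤ pj ∧ pj < ci ∧
        pivots.get? top = some (PySem.List.pyGetD cols pj [])) →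
    (∀ top, pr.get? top = none ↔ pivots.get? top = none) →
    ((pvRedA fuel cols pr rank ci col).2.2 = (pvRedB fuel pivots rank col).2 ∧
     (pvRedA fuel cols pr rank ci col).1.length = cols.length ∧
     (∀ k : Nat, k ≠ ci.toNat → (pvRedA fuel cols pr rank ci col).1[k]? = cols[k]?) ∧
     (∀ top pj, (pvRedA fuel cols pr rank ci col).2.1.get? top = some pj → 0 ≤ pj ∧ pj < ci + 1 ∧
        (pvRedB fuel pivots rank col).1.get? top =
          some (PySem.List.pyGetD (pvRedA fuel cols pr rank ci col).1 pj [])) ∧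
     (∀ top, (pvRedA fuel cols pr rank ci col).2.1.get? top = none ↔
        (pvRedB fuel pivots rank col).1.get? top = none)) := by
  intro fuel
  induction fuel with
  | zero =>
    intro col cols pr pivots rank hlen hrel hiff
    refine ⟨rfl, rfl, fun _ _ => rfl, ?_, hiff⟩
    intro top pj h
    obtain ⟨h1, h2, h3⟩ := hrel top pj h
    exact ⟨h1, by omega, h3⟩
  | succ f ih =>
    intro col cols pr pivots rank hlen hrel hiff
    by_cases hcol : col = []
    · have hA : pvRedA (f + 1) cols pr rank ci col = (cols, pr, rank) := by
        simp only [pvRedA, if_pos hcol]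
      have hB : pvRedB (f + 1) pivots rank col = (pivots, rank) := by
        simp only [pvRedB, if_pos hcol]
      rw [hA, hB]
      refine ⟨rfl, rfl, fun _ _ => rfl, ?_, hiff⟩
      intro top pj h
      obtain ⟨h1, h2, h3⟩ := hrel top pj h
      exact ⟨h1, by omega, h3⟩
    · rcases hmin : PySem.List.min? col (fun x => x) with _ | top
      · have hA : pvRedA (f + 1) cols pr rank ci col = (cols, pr, rank) := by
          simp only [pvRedA, if_neg hcol, hmin]
        have hB : pvRedB (f + 1) pivots rank col = (pivots, rank) := by
          simp only [pvRedB, if_neg hcol, hmin]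
        rw [hA, hB]
        refine ⟨rfl, rfl, fun _ _ => rfl, ?_, hiff⟩
        intro top pj h
        obtain ⟨h1, h2, h3⟩ := hrel top pj h
        exact ⟨h1, by omega, h3⟩
      · rcases hpr : pr.get? top with _ | pj
        · -- new pivot: register it on both sides
          have hpiv : pivots.get? top = none := (hiff top).mp hpr
          have hA : pvRedA (f + 1) cols pr rank ci col
              = (pvSet cols ci col, pr.insert top ci, rank + 1) := by
            simp only [pvRedA, if_neg hcol, hmin, hpr]
          have hB : pvRedB (f + 1) pivots rank col = (pivots.insert top col, rank + 1) := by
            simp only [pvRedB, if_neg hcol, hmin, hpiv]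
          rw [hA, hB]
          refine ⟨rfl, pvSet_length cols ci col, ?_, ?_, ?_⟩
          · intro k hk
            show (pvSet cols ci col)[k]? = cols[k]?
            unfold pvSet
            rw [if_pos ⟨hci0, hlen⟩]
            exact List.getElem?_set_ne (fun h => hk h.symm)
          · intro top' pj h
            rw [PySem.Dict.get?_insert] at h
            split at h
            · next heq =>
              subst heq
              injection h with h
              subst h
              refine ⟨hci0, by omega, ?_⟩
              rw [PySem.Dict.get?_insert_self]
              rw [pvSet_getD_self cols ci col [] hci0 hlen]
            · next hne =>
              obtain ⟨h1, h2, h3⟩ := hrel top' pj h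
              refine ⟨h1, by omega, ?_⟩
              rw [PySem.Dict.get?_insert_of_ne _ _ hne, h3]
              rw [pvSet_getD_ne cols ci pj col [] h1 (by omega) hci0 (by omega)]
          · intro top'
            rw [PySem.Dict.get?_insert, PySem.Dict.get?_insert]
            split
            · simp
            · exact hiff top'
        · -- reduce by the registered pivot column (identical on both sides)
          obtain ⟨hpj0, hpjlt, hpivot⟩ := hrel top pj hpr
          have hA : pvRedA (f + 1) cols pr rank ci col
              = pvRedA f cols pr rank ci
                  (PySem.Set.symmDiff col (PySem.List.pyGetD cols pj [])) := by
            simp only [pvRedA, if_neg hcol, hmin, hpr]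
          have hB : pvRedB (f + 1) pivots rank col
              = pvRedB f pivots rank
                  (PySem.Set.symmDiff col (PySem.List.pyGetD cols pj [])) := by
            simp only [pvRedB, if_neg hcol, hmin, hpivot]
          rw [hA, hB]
          exact ih (PySem.Set.symmDiff col (PySem.List.pyGetD cols pj []))
            cols pr pivots rank hlen hrel hiff

-- ---- pairing A's index loop with B's triangle loop ----

theorem pvOuterLockstep (ei : PySem.Dict (Int × Int) Int)
    (triangles : List (Int × Int × Int)) (E : Nat) :
    ∀ (ts : List (Int × Int × Int)) (ci : Int) (cols : List (PySem.Set Int))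
      (pr : PySem.Dict Int Int) (pivots : PySem.Dict Int (PySem.Set Int)) (rank : Int),
    0 ≤ ci → ci.toNat + ts.length = triangles.length →
    triangles.drop ci.toNat = ts →
    cols.length = triangles.length →
    (∀ k : Nat, ci.toNat ≤ k → cols[k]? = (triangles.map (pvBcol ei))[k]?) →
    (∀ top pj, pr.get? top = some pj → 0 ≤ pj ∧ pj < ci ∧
        pivots.get? top = some (PySem.List.pyGetD cols pj [])) →
    (∀ top, pr.get? top = none ↔ pivots.get? top = none) →
    ((PySem.List.pyRange ci (triangles.length : Int) 1).foldl
        (fun (st : List (PySem.Set Int) × PySem.Dict Int Int × Int) ci' =>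
          pvRedA (E + 1) st.1 st.2.1 st.2.2 ci' (PySem.List.pyGetD st.1 ci' []))
        (cols, pr, rank)).2.2
      = (ts.foldl (fun (st : PySem.Dict Int (PySem.Set Int) × Int) t =>
          pvRedB (E + 1) st.1 st.2 (pvBcol ei t)) (pivots, rank)).2 := by
  intro ts
  induction ts with
  | nil =>
    intro ci cols pr pivots rank hci0 hcnt _ _ _ _ _
    have hge : ¬ (ci < (triangles.length : Int)) := by
      have h0 : ci.toNat = triangles.length := by simpa using hcnt
      omega
    have hnil : PySem.List.pyRange ci (triangles.length : Int) 1 = [] := by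
      simp [PySem.List.pyRange, hge]
    rw [hnil]
    rfl
  | cons t ts' ih =>
    intro ci cols pr pivots rank hci0 hcnt hdrop hlen hcols hrel hiff
    have hlt : ci < (triangles.length : Int) := by
      have : (t :: ts').length = ts'.length + 1 := rfl
      omega
    rw [PySem.List.pyRange_one_cons hlt]
    have hci1 : (ci + 1).toNat = ci.toNat + 1 := by omega
    have htri : triangles[ci.toNat]? = some t := by
      rw [← List.head?_drop, hdrop]
      rfl
    have hcilen : ci.toNat < cols.length := by
      by_contra hc
      have h1 := hcols ci.toNat le_rfl
      rw [List.getElem?_eq_none (by omega)] at h1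
      rw [List.getElem?_map, htri] at h1
      simp at h1
    have hcolA : PySem.List.pyGetD cols ci [] = pvBcol ei t := by
      have h1 : cols[ci.toNat]? = some (pvBcol ei t) := by
        rw [hcols ci.toNat le_rfl, List.getElem?_map, htri]
        rfl
      rw [PySem.List.pyGetD_eq_getElem _ _ hci0 (by push_cast; omega)]
      rw [List.getElem?_eq_getElem hcilen] at h1
      injection h1
    obtain ⟨hrank, hlenA, hksame, hrelA, hiffA⟩ :=
      pvRed_lockstep ci hci0 (E + 1) (PySem.List.pyGetD cols ci []) cols pr pivots rank
        hcilen hrel hiff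
    rw [hcolA] at hrank hlenA hksame hrelA hiffA
    show ((PySem.List.pyRange (ci + 1) (triangles.length : Int) 1).foldl
        (fun (st : List (PySem.Set Int) × PySem.Dict Int Int × Int) ci' =>
          pvRedA (E + 1) st.1 st.2.1 st.2.2 ci' (PySem.List.pyGetD st.1 ci' []))
        (pvRedA (E + 1) cols pr rank ci (PySem.List.pyGetD cols ci []))).2.2
      = ((t :: ts').foldl (fun (st : PySem.Dict Int (PySem.Set Int) × Int) t' =>
          pvRedB (E + 1) st.1 st.2 (pvBcol ei t')) (pivots, rank)).2
    rw [hcolA]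
    set stA := pvRedA (E + 1) cols pr rank ci (pvBcol ei t) with hstA
    set stB := pvRedB (E + 1) pivots rank (pvBcol ei t) with hstB
    have happ := ih (ci + 1) stA.1 stA.2.1 stB.1 stA.2.2
      (by omega)
      (by rw [hci1]; have : (t :: ts').length = ts'.length + 1 := rfl; omega)
      (by rw [hci1, ← List.tail_drop, hdrop]; rfl)
      (by rw [hlenA, hlen])
      (by
        intro k hk
        rw [hci1] at hk
        rw [hksame k (by omega), hcols k (by omega)])
      (by
        intro top pj h
        obtain ⟨h1, h2, h3⟩ := hrelA top pj h
        exact ⟨h1, h2, h3⟩)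
      (by intro top; exact hiffA top)
    have hstB2 : (stB.1, stA.2.2) = stB := by
      rw [hrank]
    rw [hstB2] at happ
    exact happ

-- ---- the initial parent array is the identity forest ----

theorem pvInit_G (N : Nat) (x : Int) (hx : pvInR ((List.range N).map (fun k => Int.ofNat k)) x) :
    pvG ((List.range N).map (fun k => Int.ofNat k)) x = x := by
  have hlen : ((List.range N).map (fun k => Int.ofNat k)).length = N := by simp
  rcases hx with ⟨h0, h1⟩
  rw [hlen] at h1
  unfold pvG
  rw [PySem.List.pyGetD_eq_getElem _ _ h0 (by simp; omega)]
  rw [List.getElem_map, List.getElem_range]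
  exact Int.toNat_of_nonneg h0

theorem pvInit_WF (N : Nat) : pvWF ((List.range N).map (fun k => Int.ofNat k)) := by
  constructor
  · intro x hx
    rw [pvInit_G N x hx]
    exact hx
  · intro x hx
    exact ⟨0, pvInit_G N x hx⟩

theorem pvInit_root (N : Nat) (x : Int)
    (hx : pvInR ((List.range N).map (fun k => Int.ofNat k)) x) :
    pvRoot ((List.range N).map (fun k => Int.ofNat k)) x = x :=
  (pvRoot_eq_of_fix _ (pvInit_WF N) x hx 0 (pvInit_G N x hx)).symm

theorem pvInit_iff (N : Nat) : ∀ a b,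
    pvInR ((List.range N).map (fun k => Int.ofNat k)) a →
    pvInR ((List.range N).map (fun k => Int.ofNat k)) b →
    (pvRoot ((List.range N).map (fun k => Int.ofNat k)) a
       = pvRoot ((List.range N).map (fun k => Int.ofNat k)) b ↔
     pvG ((List.range N).map (fun k => Int.ofNat k)) a
       = pvG ((List.range N).map (fun k => Int.ofNat k)) b) := by
  intro a b ha hb
  rw [pvInit_root N a ha, pvInit_root N b hb, pvInit_G N a ha, pvInit_G N b hb]

theorem pvCInv_init (N : Nat) :
    pvCInv ((List.range N).map (fun k => Int.ofNat k)) PySem.Dict.empty := by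
  intro c w hw hwc
  rw [pvInit_G N w hw] at hwc
  subst hwc
  rw [PySem.Dict.getD_empty]
  constructor
  · intro v hv
    rw [List.mem_singleton] at hv
    subst hv
    exact hw
  · intro v hv
    rw [pvInit_G N v hv, List.mem_singleton]

-- ---- membership in the endpoint-collecting fold ----

theorem pvMemVertsFold (edges : List (Int × Int)) : ∀ (acc : PySem.Set Int) (x : Int),
    (x ∈ edges.foldl (fun s e => PySem.Set.add (PySem.Set.add s e.1) e.2) acc ↔
      x ∈ acc ∨ ∃ e ∈ edges, x = e.1 ∨ x = e.2) := by
  induction edges with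
  | nil => intro acc x; simp
  | cons e rest ih =>
    intro acc x
    show x ∈ rest.foldl _ (PySem.Set.add (PySem.Set.add acc e.1) e.2) ↔ _
    rw [ih]
    rw [PySem.Set.mem_add, PySem.Set.mem_add]
    simp only [List.mem_cons]
    constructor
    · rintro (((h | h) | h) | ⟨e', he', h⟩)
      · exact Or.inl h
      · exact Or.inr ⟨e, Or.inl rfl, Or.inl h⟩
      · exact Or.inr ⟨e, Or.inl rfl, Or.inr h⟩
      · exact Or.inr ⟨e', Or.inr he', h⟩
    · rintro (h | ⟨e', (rfl | he'), h⟩)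
      · exact Or.inl (Or.inl (Or.inl h))
      · rcases h with h | h
        · exact Or.inl (Or.inl (Or.inr h))
        · exact Or.inl (Or.inr h)
      · exact Or.inr ⟨e', he', h⟩

-- ===== VERDICT (by name: the statement is the Claim_ definition above) =====
theorem compute_beta1_spec : Claim_equal_compute_beta1 := by
  unfold Claim_equal_compute_beta1
  intro n edges triangles _ hpre
  unfold Spec_compute_beta1
  by_cases hE : edges.length = 0
  · simp only [compute_beta1, compute_beta1_alt, if_pos hE]
  · simp only [compute_beta1, compute_beta1_alt, if_neg hE]
    have hne : edges ≠ [] := fun h => hE (by rw [h]; rfl)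
    have hn : 0 < n := by
      rcases hh : edges with _ | ⟨e0, r⟩
      · exact absurd hh hne
      · have := hpre e0 (by rw [hh]; exact List.mem_cons_self)
        omega
    set N := n.toNat with hN
    set p0 := (List.range N).map (fun k => Int.ofNat k) with hp0
    have hp0len : p0.length = N := by simp [hp0]
    have hwf0 : pvWF p0 := pvInit_WF N
    set wedges := edges.map (fun e => (pvWrap N e.1, pvWrap N e.2)) with hwedges
    have hbounds : ∀ e ∈ edges,
        ((-(N : Int) ≤ e.1 ∧ e.1 < (N : Int)) ∧ (-(N : Int) ≤ e.2 ∧ e.2 < (N : Int))) := by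
      intro e he
      have := hpre e he
      refine ⟨⟨by omega, by omega⟩, by omega, by omega⟩
    have hAfold : edges.foldl (fun p e => pvUnion p e.1 e.2) p0
        = wedges.foldl (fun p e => pvUnion p e.1 e.2) p0 :=
      pvFoldWrap N edges p0 hp0len hwf0 hbounds
    have hBfold : edges.foldl pvRecolor (p0, PySem.Dict.empty)
        = wedges.foldl pvRecolor (p0, PySem.Dict.empty) :=
      pvFoldWrapB N edges (p0, PySem.Dict.empty) hp0len hbounds
    have hwR : ∀ e ∈ wedges, pvInR p0 e.1 ∧ pvInR p0 e.2 := by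
      intro e he
      rw [hwedges] at he
      obtain ⟨e0, he0, rfl⟩ := List.mem_map.mp he
      obtain ⟨⟨h1, h2⟩, h3, h4⟩ := hbounds e0 he0
      have hA := pvWrap_inR p0 e0.1 (by rw [hp0len]; omega) (by rw [hp0len]; omega)
      have hB := pvWrap_inR p0 e0.2 (by rw [hp0len]; omega) (by rw [hp0len]; omega)
      rw [hp0len] at hA hB
      exact ⟨hA, hB⟩
    obtain ⟨hwfF, hlenF, hlenL, hiffF⟩ :=
      pvFold2 wedges p0 p0 PySem.Dict.empty hwf0 rfl (pvInit_iff N) (pvCInv_init N) hwR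
    rw [hAfold, hBfold]
    set pF := wedges.foldl (fun p e => pvUnion p e.1 e.2) p0 with hpF
    set labF := (wedges.foldl pvRecolor (p0, PySem.Dict.empty)).1 with hlabF
    set verts := edges.foldl
      (fun s e => PySem.Set.add (PySem.Set.add s e.1) e.2) PySem.Set.empty with hverts
    have hlenFN : pF.length = N := by rw [hlenF, hp0len]
    have hlabN : labF.length = N := by rw [hlenL, hp0len]
    have hvmem : ∀ v, v ∈ verts → -(N : Int) ≤ v ∧ v < (N : Int) := by
      intro v hv
      have := (pvMemVertsFold edges PySem.Set.empty v).mp hv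
      rcases this with h | ⟨e, he, hor⟩
      · exact absurd h (List.not_mem_nil)
      · obtain ⟨⟨h1, h2⟩, h3, h4⟩ := hbounds e he
        rcases hor with rfl | rfl
        · exact ⟨h1, h2⟩
        · exact ⟨h3, h4⟩
    have hvertsB : ∀ v ∈ verts, -(pF.length : Int) ≤ v ∧ v < (pF.length : Int) := by
      intro v hv
      rw [hlenFN]
      exact hvmem v hv
    rw [pvCountFoldW verts pF PySem.Set.empty hwfF hvertsB]
    -- B's colour lookups wrap exactly like A's parent lookups
    have hBwrap : verts.foldl (fun s v => PySem.Set.add s (pvG labF v)) PySem.Set.empty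
        = verts.foldl (fun s v => PySem.Set.add s (pvG labF (pvWrap N v))) PySem.Set.empty := by
      apply PySem.List.foldl_congr_mem
      intro acc v hv
      obtain ⟨h1, h2⟩ := hvmem v hv
      have := pvG_wrap labF v (by rw [hlabN]; omega) (by rw [hlabN]; omega)
      rw [hlabN] at this
      rw [this]
    rw [hBwrap]
    -- the two component counts agree: equal partitions give equal distinct counts
    have hcnt : (verts.foldl
          (fun s v => PySem.Set.add s (pvRoot pF (pvWrap pF.length v))) PySem.Set.empty).length
        = (verts.foldl
          (fun s v => PySem.Set.add s (pvG labF (pvWrap N v))) PySem.Set.empty).length := by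
    -- align the wrap length on the A side
      have hwlen : ∀ v, pvWrap pF.length v = pvWrap N v := by
        intro v; rw [hlenFN]
      have hfix : (verts.foldl
            (fun s v => PySem.Set.add s (pvRoot pF (pvWrap pF.length v))) PySem.Set.empty)
          = (verts.foldl
            (fun s v => PySem.Set.add s (pvRoot pF (pvWrap N v))) PySem.Set.empty) := by
        apply PySem.List.foldl_congr_mem
        intro acc v _
        rw [hwlen v]
      rw [hfix]
      apply pvSetLenCongr verts (fun v => pvRoot pF (pvWrap N v)) (fun v => pvG labF (pvWrap N v))
        _ PySem.Set.empty PySem.Set.empty rfl (fun a _ => by simp [PySem.Set.empty])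
      intro a ha b hb
      obtain ⟨ha1, ha2⟩ := hvmem a ha
      obtain ⟨hb1, hb2⟩ := hvmem b hb
      have hwa : pvInR p0 (pvWrap N a) := by
        have := pvWrap_inR p0 a (by rw [hp0len]; omega) (by rw [hp0len]; omega)
        rw [hp0len] at this
        exact this
      have hwb : pvInR p0 (pvWrap N b) := by
        have := pvWrap_inR p0 b (by rw [hp0len]; omega) (by rw [hp0len]; omega)
        rw [hp0len] at this
        exact this
      exact hiffF (pvWrap N a) (pvWrap N b) hwa hwb
    rw [hcnt]
    by_cases hF : triangles.length = 0
    · rw [if_pos hF, if_pos hF]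
    · rw [if_neg hF, if_neg hF]
      have houter := pvOuterLockstep (pvEdgeIdx edges) triangles edges.length triangles 0
        (triangles.map (pvBcol (pvEdgeIdx edges))) PySem.Dict.empty PySem.Dict.empty 0
        le_rfl
        (by simp)
        rfl
        (by simp)
        (fun k _ => rfl)
        (by
          intro top pj h
          rw [PySem.Dict.get?_empty] at h
          simp at h)
        (by intro top; rw [PySem.Dict.get?_empty, PySem.Dict.get?_empty]; exact ⟨fun _ => rfl, fun _ => rfl⟩)
      rw [houter]
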